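-- pv_equiv track=rewrite | github.com/SalMutt/eol-tool | src/eol_tool/api.py | _infer_manufacturer
-- ===== SOURCE A (Python) =====
-- def _infer_manufacturer(model_str: str) -> str:
--     """Try to infer manufacturer from model string using known checker prefixes."""
--     upper = model_str.upper()
--     prefix_map = {
--         "EX": "Juniper",
--         "QFX": "Juniper",
--         "MX": "Juniper",
--         "SRX": "Juniper",
--         "ACX": "Juniper",
--         "JNP": "Juniper",
--         "WS-C": "Cisco",
--         "N9K": "Cisco",
--         "N5K": "Cisco",
--         "N3K": "Cisco",
--         "C9": "Cisco",
--         "ASR": "Cisco",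
--         "ISR": "Cisco",
--         "XEON": "Intel",
--         "X520": "Intel",
--         "X540": "Intel",
--         "X550": "Intel",
--         "X710": "Intel",
--         "E5-": "Intel",
--         "E3-": "Intel",
--         "EPYC": "AMD",
--         "OPTERON": "AMD",
--         "POWEREDGE": "Dell",
--         "MZ-": "Samsung",
--         "PM": "Samsung",
--         "MZIL": "Samsung",
--         "ST": "Seagate",
--         "X10": "Supermicro",
--         "X11": "Supermicro",
--         "X12": "Supermicro",
--         "X13": "Supermicro",
--         "MCX": "Mellanox",
--         "CX": "Mellanox",
--         "MTFD": "Micron",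
--         "5300": "Micron",
--         "5400": "Micron",
--         "WD": "WD",
--         "WUS": "WD",
--     }
--     for prefix, mfr in prefix_map.items():
--         if upper.startswith(prefix):
--             return mfr
--     return ""
-- ===== SOURCE B (Python) =====
-- def _infer_manufacturer(model_str: str) -> str:
--     """Try to infer manufacturer from model string using known checker prefixes."""
--     upper = model_str.upper()
--     # Same key set, stored inverted (manufacturer -> its prefixes), flattened
--     # into one lookup table; no key is a prefix of another, so at most one
--     # candidate slice can ever hit and order does not matter.
--     groups = [
--         ("Juniper", ("EX", "QFX", "MX", "SRX", "ACX", "JNP")),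
--         ("Cisco", ("WS-C", "N9K", "N5K", "N3K", "C9", "ASR", "ISR")),
--         ("Intel", ("XEON", "X520", "X540", "X550", "X710", "E5-", "E3-")),
--         ("AMD", ("EPYC", "OPTERON")),
--         ("Dell", ("POWEREDGE",)),
--         ("Samsung", ("MZ-", "PM", "MZIL")),
--         ("Seagate", ("ST",)),
--         ("Supermicro", ("X10", "X11", "X12", "X13")),
--         ("Mellanox", ("MCX", "CX")),
--         ("Micron", ("MTFD", "5300", "5400")),
--         ("WD", ("WD", "WUS")),
--     ]
--     lookup = {p: mfr for mfr, prefixes in groups for p in prefixes}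
--     # hash-look up each candidate slice, one per distinct key length,
--     # instead of scanning every prefix with startswith
--     for length in sorted({len(p) for p in lookup}):
--         mfr = lookup.get(upper[:length])
--         if mfr is not None:
--             return mfr
--     return ""
-- ===== Notes on version B (the rewrite author's own statement) =====
-- stated objective: idiomatic
-- what changed: B stores the table inverted (manufacturer -> prefixes), flattens it into one hash map, and instead of scanning all 38 prefixes with startswith it hash-looks-up each candidate slice upper[:L], one per distinct key length; equivalent because no key is a prefix of another, so at most one prefix matches any input.
import Mathlib
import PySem

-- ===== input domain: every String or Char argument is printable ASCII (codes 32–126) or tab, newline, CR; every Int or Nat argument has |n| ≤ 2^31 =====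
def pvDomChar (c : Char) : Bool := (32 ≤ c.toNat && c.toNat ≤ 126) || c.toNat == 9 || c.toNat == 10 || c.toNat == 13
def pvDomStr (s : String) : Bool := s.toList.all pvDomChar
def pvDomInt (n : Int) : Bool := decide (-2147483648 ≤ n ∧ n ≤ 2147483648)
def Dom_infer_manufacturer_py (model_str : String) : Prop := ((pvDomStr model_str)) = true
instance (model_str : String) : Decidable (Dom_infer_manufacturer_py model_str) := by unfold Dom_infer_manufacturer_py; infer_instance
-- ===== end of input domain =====

-- B stores the table inverted (manufacturer -> prefixes), flattens it into one hash map
-- and hash-looks-up each candidate slice upper[:L] (one per distinct key length) instead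
-- of A's startswith-scan over all 38 prefixes (idiomatic; no speed claim).

-- ===== PORT A =====
-- A's dict literal, byte for byte
def pvPrefixPairs : List (String × String) :=
  [("EX", "Juniper"), ("QFX", "Juniper"), ("MX", "Juniper"), ("SRX", "Juniper"),
   ("ACX", "Juniper"), ("JNP", "Juniper"), ("WS-C", "Cisco"), ("N9K", "Cisco"),
   ("N5K", "Cisco"), ("N3K", "Cisco"), ("C9", "Cisco"), ("ASR", "Cisco"),
   ("ISR", "Cisco"), ("XEON", "Intel"), ("X520", "Intel"), ("X540", "Intel"),
   ("X550", "Intel"), ("X710", "Intel"), ("E5-", "Intel"), ("E3-", "Intel"),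
   ("EPYC", "AMD"), ("OPTERON", "AMD"), ("POWEREDGE", "Dell"), ("MZ-", "Samsung"),
   ("PM", "Samsung"), ("MZIL", "Samsung"), ("ST", "Seagate"), ("X10", "Supermicro"),
   ("X11", "Supermicro"), ("X12", "Supermicro"), ("X13", "Supermicro"),
   ("MCX", "Mellanox"), ("CX", "Mellanox"), ("MTFD", "Micron"), ("5300", "Micron"),
   ("5400", "Micron"), ("WD", "WD"), ("WUS", "WD")]

-- `for prefix, mfr in prefix_map.items(): if upper.startswith(prefix): return mfr` / `return ""`
def pvLoopA : List (String × String) → String → String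
  | [], _ => ""
  | (pfx, mfr) :: rest, u => if PySem.Str.startswith u pfx then mfr else pvLoopA rest u

def infer_manufacturer_py (model_str : String) : String :=
  let upper := PySem.Str.upper model_str
  let prefix_map : PySem.Dict String String := PySem.Dict.ofList pvPrefixPairs
  pvLoopA prefix_map.items upper

-- ===== PORT B =====
-- B's inverted table: manufacturer -> its prefixes
def pvGroups : List (String × List String) :=
  [("Juniper", ["EX", "QFX", "MX", "SRX", "ACX", "JNP"]),
   ("Cisco", ["WS-C", "N9K", "N5K", "N3K", "C9", "ASR", "ISR"]),
   ("Intel", ["XEON", "X520", "X540", "X550", "X710", "E5-", "E3-"]),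
   ("AMD", ["EPYC", "OPTERON"]),
   ("Dell", ["POWEREDGE"]),
   ("Samsung", ["MZ-", "PM", "MZIL"]),
   ("Seagate", ["ST"]),
   ("Supermicro", ["X10", "X11", "X12", "X13"]),
   ("Mellanox", ["MCX", "CX"]),
   ("Micron", ["MTFD", "5300", "5400"]),
   ("WD", ["WD", "WUS"])]

-- `for length in lengths: mfr = lookup.get(upper[:length]); if mfr is not None: return mfr` / `return ""`
def pvLoopB (d : PySem.Dict String String) : List Int → String → String
  | [], _ => ""
  | len :: rest, u =>
      match d.get? (PySem.Str.slice u none (some len)) with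
      | some mfr => mfr
      | none => pvLoopB d rest u

def infer_manufacturer_py_alt (model_str : String) : String :=
  let upper := PySem.Str.upper model_str
  -- lookup = {p: mfr for mfr, prefixes in groups for p in prefixes}
  let lookup : PySem.Dict String String :=
    PySem.Dict.ofList (pvGroups.flatMap (fun g => g.2.map (fun p => (p, g.1))))
  -- sorted({len(p) for p in lookup})
  let lengths : List Int :=
    PySem.List.sorted (PySem.Set.ofList (lookup.keys.map (fun k => (PySem.Str.len k : Int)))) (fun x => x) false
  pvLoopB lookup lengths upper

-- ===== PRECONDITION & SPEC =====
def Spec_infer_manufacturer_py (model_str : String) (out : String) : Prop := out = infer_manufacturer_py_alt model_str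
instance (model_str : String) (out : String) : Decidable (Spec_infer_manufacturer_py model_str out) := by unfold Spec_infer_manufacturer_py; infer_instance

-- ===== CLAIM (what is proved, stated in full; the proofs are below) =====
def Claim_equal_infer_manufacturer_py : Prop := ∀ (model_str : String), Dom_infer_manufacturer_py model_str → Spec_infer_manufacturer_py model_str (infer_manufacturer_py model_str)

-- ===== LEMMAS AND PROOFS =====

-- shorthand (proof-side only) for B's flattened dict
def pvBDict : PySem.Dict String String :=
  PySem.Dict.ofList (pvGroups.flatMap (fun g => g.2.map (fun p => (p, g.1))))

-- A's concrete dict has the pairs as items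
set_option maxRecDepth 40000 in
theorem pv_items_eq : (PySem.Dict.ofList pvPrefixPairs).items = pvPrefixPairs := by decide

-- B's flattened dict has Nodup keys, its items are exactly A's pairs (as a set),
-- and B's computed length list is [2,3,4,7,9]
set_option maxRecDepth 40000 in
theorem pvB_nodup_keys : pvBDict.keys.Nodup := by decide

set_option maxRecDepth 40000 in
theorem pvB_items_sub : ∀ p ∈ pvBDict.items, p ∈ pvPrefixPairs := by decide

set_option maxRecDepth 40000 in
theorem pvB_items_sup : ∀ p ∈ pvPrefixPairs, p ∈ pvBDict.items := by decide

set_option maxRecDepth 40000 in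
theorem pvB_lengths_eq :
    PySem.List.sorted (PySem.Set.ofList (pvBDict.keys.map (fun k => (PySem.Str.len k : Int)))) (fun x => x) false
      = ([2, 3, 4, 7, 9] : List Int) := by decide

-- no key of the table is a prefix of a different key (checked over all pairs)
set_option maxRecDepth 40000 in
theorem pv_no_prefix : ∀ p ∈ pvPrefixPairs, ∀ q ∈ pvPrefixPairs, p.1.toList <+: q.1.toList → p = q := by decide

-- every key length occurs in the length list
set_option maxRecDepth 40000 in
theorem pv_len_mem : ∀ p ∈ pvPrefixPairs, ((p.1.toList.length : Int)) ∈ ([2, 3, 4, 7, 9] : List Int) := by decide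

-- at most one table entry has its key a prefix of u
theorem pv_uniq {u : String} {p q : String × String} (hp : p ∈ pvPrefixPairs) (hq : q ∈ pvPrefixPairs)
    (hpu : p.1.toList <+: u.toList) (hqu : q.1.toList <+: u.toList) : p = q := by
  rcases List.prefix_or_prefix_of_prefix hpu hqu with h | h
  · exact pv_no_prefix p hp q hq h
  · exact (pv_no_prefix q hq p hp h).symm

theorem pv_startswith_iff (u p : String) : PySem.Str.startswith u p = true ↔ p.toList <+: u.toList := by
  simp [PySem.Chars.startswith_iff]

theorem pv_slice_toList (u : String) (n : Nat) :
    (PySem.Str.slice u none (some (n : Int))).toList = u.toList.take n := by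
  simp [PySem.List.slice_to_natCast]

-- A's loop is first-match over the pair list
theorem pv_loopA_eq_find (ps : List (String × String)) (u : String) :
    pvLoopA ps u = ((ps.find? (fun kv => PySem.Str.startswith u kv.1)).map Prod.snd).getD "" := by
  induction ps with
  | nil => rfl
  | cons kv rest ih =>
      obtain ⟨pfx, mfr⟩ := kv
      by_cases h : PySem.Chars.startswith u.toList pfx.toList = true
      · simp [pvLoopA, List.find?, h]
      · simp only [Bool.not_eq_true] at h
        simp [pvLoopA, List.find?, h, ih]

-- membership characterisation of get? on B's dict
theorem pvB_get_some {c m : String} (h : pvBDict.get? c = some m) :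
    (c, m) ∈ pvPrefixPairs :=
  pvB_items_sub _ (PySem.Dict.mem_items_of_get?_eq_some pvBDict h)

theorem pvB_get_of_mem {c m : String} (h : (c, m) ∈ pvPrefixPairs) :
    pvBDict.get? c = some m :=
  PySem.Dict.get?_of_mem_items pvBDict (pvB_items_sup _ h) pvB_nodup_keys

-- B's loop returns "" when every slice-lookup misses
theorem pv_loopB_none (ls : List Int) (u : String)
    (h : ∀ L ∈ ls, pvBDict.get? (PySem.Str.slice u none (some L)) = none) :
    pvLoopB pvBDict ls u = "" := by
  induction ls with
  | nil => rfl
  | cons L rest ih =>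
      have h0 := h L (List.mem_cons_self)
      simp only [pvLoopB, h0]
      exact ih (fun L' hL' => h L' (List.mem_cons_of_mem _ hL'))

-- B's loop returns v when every hit yields v and some length hits
theorem pv_loopB_hit (ls : List Int) (u v : String)
    (hall : ∀ L ∈ ls, ∀ m, pvBDict.get? (PySem.Str.slice u none (some L)) = some m → m = v)
    (hex : ∃ L ∈ ls, (pvBDict.get? (PySem.Str.slice u none (some L))).isSome) :
    pvLoopB pvBDict ls u = v := by
  induction ls with
  | nil => simp at hex
  | cons L rest ih =>
      cases hc : pvBDict.get? (PySem.Str.slice u none (some L)) with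
      | some m =>
          simp only [pvLoopB, hc]
          exact hall L (List.mem_cons_self) m hc
      | none =>
          simp only [pvLoopB, hc]
          refine ih (fun L' hL' => hall L' (List.mem_cons_of_mem _ hL')) ?_
          rcases hex with ⟨L', hL', hs⟩
          rcases List.mem_cons.mp hL' with rfl | hL'
          · rw [hc] at hs; simp at hs
          · exact ⟨L', hL', hs⟩

-- a successful lookup key is a prefix of u
theorem pv_hit_prefix {u c m : String} {L : Nat}
    (h : pvBDict.get? (PySem.Str.slice u none (some (L : Int))) = some m)
    (hc : c = PySem.Str.slice u none (some (L : Int))) : (c, m) ∈ pvPrefixPairs ∧ c.toList <+: u.toList := by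
  subst hc
  refine ⟨pvB_get_some h, ?_⟩
  rw [pv_slice_toList]
  exact List.take_prefix _ _

-- core equivalence on the shared uppercased string
theorem pv_core (u : String) :
    pvLoopA (PySem.Dict.ofList pvPrefixPairs).items u
      = pvLoopB pvBDict ([2, 3, 4, 7, 9] : List Int) u := by
  rw [pv_items_eq, pv_loopA_eq_find]
  cases hF : pvPrefixPairs.find? (fun kv => PySem.Str.startswith u kv.1) with
  | none =>
      have hB : pvLoopB pvBDict ([2, 3, 4, 7, 9] : List Int) u = "" := by
        refine pv_loopB_none _ u ?_
        intro L hL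
        cases hget : pvBDict.get? (PySem.Str.slice u none (some L)) with
        | none => rfl
        | some m =>
            exfalso
            obtain ⟨n, rfl⟩ : ∃ n : Nat, L = (n : Int) := by
              fin_cases hL
              exacts [⟨2, by norm_num⟩, ⟨3, by norm_num⟩, ⟨4, by norm_num⟩, ⟨7, by norm_num⟩, ⟨9, by norm_num⟩]
            obtain ⟨hmem, hpre⟩ := pv_hit_prefix hget rfl
            have hno := List.find?_eq_none.mp hF _ hmem
            simp only [pv_startswith_iff] at hno
            exact hno hpre
      rw [hB]
      rfl
  | some kv =>
      have hmem : kv ∈ pvPrefixPairs := List.mem_of_find?_eq_some hF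
      have hsw : kv.1.toList <+: u.toList :=
        (pv_startswith_iff u kv.1).mp (List.find?_some (p := fun q : String × String => PySem.Str.startswith u q.1) hF)
      have hB : pvLoopB pvBDict ([2, 3, 4, 7, 9] : List Int) u = kv.2 := by
        refine pv_loopB_hit _ u kv.2 ?_ ?_
        · intro L hL m hget
          obtain ⟨n, rfl⟩ : ∃ n : Nat, L = (n : Int) := by
            fin_cases hL
            exacts [⟨2, by norm_num⟩, ⟨3, by norm_num⟩, ⟨4, by norm_num⟩, ⟨7, by norm_num⟩, ⟨9, by norm_num⟩]
          obtain ⟨hmem2, hpre2⟩ := pv_hit_prefix hget rfl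
          have heq : (PySem.Str.slice u none (some ((n : Nat) : Int)), m) = kv := pv_uniq hmem2 hmem hpre2 hsw
          exact congrArg Prod.snd heq
        · refine ⟨(kv.1.toList.length : Int), pv_len_mem kv hmem, ?_⟩
          have hslice : PySem.Str.slice u none (some ((kv.1.toList.length : Nat) : Int)) = kv.1 := by
            apply String.toList_inj.mp
            rw [pv_slice_toList]
            exact (List.prefix_iff_eq_take.mp hsw).symm
          rw [hslice, pvB_get_of_mem (show (kv.1, kv.2) ∈ pvPrefixPairs from hmem)]
          rfl
      rw [hB]
      rfl

-- ===== VERDICT (by name: the statement is the Claim_ definition above) =====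
theorem infer_manufacturer_py_spec : Claim_equal_infer_manufacturer_py := by
  intro model_str _
  unfold Spec_infer_manufacturer_py
  simp only [infer_manufacturer_py, infer_manufacturer_py_alt]
  rw [show PySem.Dict.ofList (pvGroups.flatMap (fun g => g.2.map (fun p => (p, g.1)))) = pvBDict from rfl]
  rw [pvB_lengths_eq]
  exact pv_core (PySem.Str.upper model_str)
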